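-- pv_equiv track=rewrite | github.com/Akash-Sharma1/Code-Visualizer | codevisualizer/codevis/cppupd.py | checkupdates
-- ===== SOURCE A (Python) =====
-- def checkupdates(code,dic):
--     for i in range(len(code)):
--         if dic[i] != "0":
--             flag="0"
--             j=i
--             while(j < len(code) and j!='\n' and j!=';'):
--                 if code[j]=='=' or code[j]=='.':
--                     flag=dic[i]
--                 j+=1
--                 #potential == failure case
--             dic[i]=flag
--     return dic
-- ===== SOURCE B (Python) =====
-- def checkupdates(code, dic):
--     # Single pass: last index of '=' or '.' in code; dic[i] survives iff i <= last.
--     # Like A, mutates dic in place and returns it.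
--     last = -1
--     for k, c in enumerate(code):
--         if c == '=' or c == '.':
--             last = k
--     n = len(code)
--     dic[:n] = [d if i <= last else "0" for i, d in enumerate(dic[:n])]
--     return dic
-- ===== Notes on version B (the rewrite author's own statement) =====
-- stated objective: faster
-- what changed: Replaced A's per-entry rescan of the rest of the string (inner while over code[i:] for every i) by one pass computing the last index of '=' or '.', then a single comparison i <= last per entry.
-- outside the precondition, e.g. on checkupdates('ab', ['x']): A raises IndexError, B returns ['0']
import Mathlib
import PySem

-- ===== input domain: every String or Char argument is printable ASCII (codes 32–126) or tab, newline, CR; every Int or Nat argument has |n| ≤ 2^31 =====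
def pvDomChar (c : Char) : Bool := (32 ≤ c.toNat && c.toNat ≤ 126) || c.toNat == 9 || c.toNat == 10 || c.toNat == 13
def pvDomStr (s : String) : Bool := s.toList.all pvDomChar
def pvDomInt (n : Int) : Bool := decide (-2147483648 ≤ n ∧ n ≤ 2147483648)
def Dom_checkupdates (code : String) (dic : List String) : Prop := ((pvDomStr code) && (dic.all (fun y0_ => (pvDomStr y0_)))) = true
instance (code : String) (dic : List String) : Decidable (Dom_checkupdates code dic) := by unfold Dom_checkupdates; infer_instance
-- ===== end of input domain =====

-- B replaces A's per-entry rescan of code[i:] by one pass computing the last index of '=' or '.'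
-- (objective: faster). Both Pythons mutate dic in place; the equivalence proved here is about the
-- return value only.

-- ===== PORT A =====
-- inner 'while(j < len(code) …)' loop of A
def cuWhile (cs : List Char) (n : Nat) (j : Nat) (di flag : String) : String :=
  if j < n then
    cuWhile cs n (j + 1) di (if cs.getD j ' ' = '=' ∨ cs.getD j ' ' = '.' then di else flag)
  else flag
termination_by n - j

def checkupdates (code : String) (dic : List String) : List String :=
  let cs := code.toList
  (List.range cs.length).foldl
    (fun d i =>
      if d.getD i "" ≠ "0" then d.set i (cuWhile cs cs.length i (d.getD i "") "0") else d)
    dic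

-- ===== PORT B =====
def checkupdates_alt (code : String) (dic : List String) : List String :=
  let cs := code.toList
  let last : Int :=
    cs.zipIdx.foldl (fun acc p => if p.1 = '=' ∨ p.1 = '.' then (p.2 : Int) else acc) (-1)
  let n := cs.length
  ((dic.take n).zipIdx.map (fun p => if (p.2 : Int) ≤ last then p.1 else "0")) ++ dic.drop n

-- ===== PRECONDITION & SPEC =====
-- A indexes dic[i] for every i < len(code): it raises IndexError when len(dic) < len(code).
def Pre_checkupdates (code : String) (dic : List String) : Prop :=
  code.toList.length ≤ dic.length
instance (code : String) (dic : List String) : Decidable (Pre_checkupdates code dic) := by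
  unfold Pre_checkupdates; infer_instance

def pvWitness_checkupdates : String × List String := ("a=b", ["x", "0", "y"])

def Spec_checkupdates (code : String) (dic : List String) (out : List String) : Prop := out = checkupdates_alt code dic
instance (code : String) (dic : List String) (out : List String) : Decidable (Spec_checkupdates code dic out) := by unfold Spec_checkupdates; infer_instance

-- ===== CLAIM (what is proved, stated in full; the proofs are below) =====
def Claim_equal_checkupdates : Prop := ∀ (code : String) (dic : List String), Dom_checkupdates code dic → Pre_checkupdates code dic → Spec_checkupdates code dic (checkupdates code dic)

-- ===== LEMMAS AND PROOFS =====

-- abbreviation used only by the proofs: B's "last index of '=' or '.'"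
def cuLast (cs : List Char) : Int :=
  cs.zipIdx.foldl (fun acc p => if p.1 = '=' ∨ p.1 = '.' then (p.2 : Int) else acc) (-1)

theorem cuLast_le_iff (cs : List Char) (j : Nat) :
    ((j : Int) ≤ cuLast cs) ↔
      ∃ k, k < cs.length ∧ j ≤ k ∧ (cs.getD k ' ' = '=' ∨ cs.getD k ' ' = '.') := by
  induction cs using List.reverseRecOn with
  | nil =>
    simp [cuLast]
    omega
  | append_singleton l c ih =>
    rw [cuLast, List.zipIdx_append, List.foldl_append]
    simp only [List.foldl_cons, List.foldl_nil, List.zipIdx_singleton, Nat.zero_add]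
    by_cases hc : c = '=' ∨ c = '.'
    · simp only [hc, if_pos]
      constructor
      · intro h
        exact ⟨l.length, by simp, by exact_mod_cast h, by simp [hc]⟩
      · rintro ⟨k, hk, hjk, -⟩
        simp at hk
        exact_mod_cast le_trans (Int.ofNat_le.mpr hjk) (Int.ofNat_le.mpr (by omega))
    · simp only [hc, if_neg, not_false_iff]
      rw [← cuLast, ih]
      constructor
      · rintro ⟨k, hk, hjk, hhit⟩
        exact ⟨k, by simp; omega, hjk, by rw [List.getD_append _ _ _ _ hk]; exact hhit⟩
      · rintro ⟨k, hk, hjk, hhit⟩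
        simp at hk
        rcases Nat.lt_or_ge k l.length with hkl | hkl
        · exact ⟨k, hkl, hjk, by rwa [List.getD_append _ _ _ _ hkl] at hhit⟩
        · exfalso
          have hk' : k = l.length := by omega
          subst hk'
          rw [List.getD_append_right _ _ _ _ (le_refl _)] at hhit
          simp at hhit
          exact hc hhit

theorem cuWhile_same (cs : List Char) (n : Nat) (j : Nat) (di : String) :
    cuWhile cs n j di di = di := by
  induction hd : n - j generalizing j with
  | zero => rw [cuWhile, if_neg (by omega)]
  | succ d ih =>
    rw [cuWhile, if_pos (by omega), ite_self]
    exact ih (j + 1) (by omega)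

theorem cuWhile_of_hit (cs : List Char) (n : Nat) (j : Nat) (di flag : String)
    (h : ∃ k, k < n ∧ j ≤ k ∧ (cs.getD k ' ' = '=' ∨ cs.getD k ' ' = '.')) :
    cuWhile cs n j di flag = di := by
  obtain ⟨k, hkn, hjk, hhit⟩ := h
  induction hd : n - j generalizing j flag with
  | zero => omega
  | succ d ih =>
    rw [cuWhile, if_pos (by omega)]
    by_cases hj : j = k
    · subst hj
      rw [if_pos hhit]
      exact cuWhile_same cs n (j + 1) di
    · exact ih (j + 1) _ (by omega) (by omega)

theorem cuWhile_of_no_hit (cs : List Char) (n : Nat) (j : Nat) (di flag : String)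
    (h : ¬ ∃ k, k < n ∧ j ≤ k ∧ (cs.getD k ' ' = '=' ∨ cs.getD k ' ' = '.')) :
    cuWhile cs n j di flag = flag := by
  induction hd : n - j generalizing j flag with
  | zero => rw [cuWhile, if_neg (by omega)]
  | succ d ih =>
    rw [cuWhile, if_pos (by omega),
        if_neg (fun hc => h ⟨j, by omega, le_refl _, hc⟩)]
    exact ih (j + 1) flag (fun ⟨k, hk1, hk2, hk3⟩ => h ⟨k, hk1, by omega, hk3⟩) (by omega)

theorem cuWhile_eq (cs : List Char) (j : Nat) (di : String) :
    cuWhile cs cs.length j di "0" = if (j : Int) ≤ cuLast cs then di else "0" := by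
  by_cases h : (j : Int) ≤ cuLast cs
  · rw [if_pos h, cuWhile_of_hit]
    exact (cuLast_le_iff cs j).mp h
  · rw [if_neg h, cuWhile_of_no_hit]
    intro hx
    exact h ((cuLast_le_iff cs j).mpr hx)

theorem cuFold_eq (cs : List Char) (dic : List String) (m : Nat)
    (hm : m ≤ cs.length) (hd : m ≤ dic.length) :
    (List.range m).foldl
      (fun d i =>
        if d.getD i "" ≠ "0" then d.set i (cuWhile cs cs.length i (d.getD i "") "0") else d)
      dic
    = ((dic.take m).zipIdx.map (fun p => if (p.2 : Int) ≤ cuLast cs then p.1 else "0"))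
        ++ dic.drop m := by
  induction m with
  | zero => simp
  | succ m ih =>
    have hm1 : m < cs.length := by omega
    have hd1 : m < dic.length := by omega
    rw [List.range_succ, List.foldl_append, ih (by omega) (by omega)]
    simp only [List.foldl_cons, List.foldl_nil]
    have hlen :
        ((dic.take m).zipIdx.map
          (fun p => if (p.2 : Int) ≤ cuLast cs then p.1 else "0")).length = m := by
      simp [Nat.min_eq_left (le_of_lt hd1)]
    have hdrop : dic.drop m = dic[m] :: dic.drop (m + 1) := List.drop_eq_getElem_cons hd1
    have hget :
        (((dic.take m).zipIdx.map
          (fun p => if (p.2 : Int) ≤ cuLast cs then p.1 else "0")) ++ dic.drop m).getD m ""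
          = dic[m] := by
      rw [hdrop, List.getD_append_right _ _ _ _ (le_of_eq hlen), hlen]
      simp [List.getElem?_eq_getElem hd1]
    have htake : dic.take (m + 1) = dic.take m ++ [dic[m]] :=
      List.take_succ_eq_append_getElem hd1
    have hz : (dic.take m ++ [dic[m]]).zipIdx = (dic.take m).zipIdx ++ [(dic[m], m)] := by
      rw [List.zipIdx_append]
      simp [Nat.min_eq_left (le_of_lt hd1)]
    rw [hget, htake, hz, List.map_append, List.map_singleton]
    by_cases h0 : dic[m] = "0"
    · rw [if_neg (by simp [h0]), hdrop]
      simp only [h0, ite_self]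
      rw [List.append_assoc, List.singleton_append]
    · rw [if_pos (by simp [h0]), hdrop, cuWhile_eq]
      rw [List.set_append_right _ _ (le_of_eq hlen), hlen, Nat.sub_self]
      rw [List.set_cons_zero, List.append_assoc, List.singleton_append]

-- ===== VERDICT (by name: the statement is the Claim_ definition above) =====
theorem checkupdates_spec : Claim_equal_checkupdates := by
  intro code dic _ hpre
  show checkupdates code dic = checkupdates_alt code dic
  unfold checkupdates checkupdates_alt
  rw [cuFold_eq code.toList dic code.toList.length (le_refl _) hpre]
  rfl
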